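-- pv_equiv track=rewrite | github.com/BrunoPessoa22/aguia | scripts/video-gen/falcao-video-caption.py | ffmpeg_escape
-- ===== SOURCE A (Python) =====
-- def ffmpeg_escape(text: str) -> str:
--     """Escape a string for ffmpeg drawtext's text= option.
--
--     Order matters: backslashes first, then colon, single-quote, comma, percent,
--     square brackets.
--     """
--     replacements = [
--         ("\\", "\\\\"),
--         (":", "\\:"),
--         ("'", "\\'"),
--         (",", "\\,"),
--         ("%", "\\%"),
--         ("[", "\\["),
--         ("]", "\\]"),
--     ]
--     for old, new in replacements:
--         text = text.replace(old, new)
--     return text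
-- ===== SOURCE B (Python) =====
-- def ffmpeg_escape(text: str) -> str:
--     """Escape a string for ffmpeg drawtext's text= option.
--
--     Single pass: each special character gets a backslash prepended; this is
--     exact because the sequential replaces in the original never re-escape the
--     backslashes they insert.
--     """
--     specials = "\\:',%[]"
--     return "".join("\\" + c if c in specials else c for c in text)
-- ===== Notes on version B (the rewrite author's own statement) =====
-- stated objective: idiomatic
-- what changed: Replaced seven sequential full-string replace scans with a single character-by-character pass that prepends a backslash to each of the seven special characters (valid because the original never re-escapes the backslashes it inserts).
import Mathlib
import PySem

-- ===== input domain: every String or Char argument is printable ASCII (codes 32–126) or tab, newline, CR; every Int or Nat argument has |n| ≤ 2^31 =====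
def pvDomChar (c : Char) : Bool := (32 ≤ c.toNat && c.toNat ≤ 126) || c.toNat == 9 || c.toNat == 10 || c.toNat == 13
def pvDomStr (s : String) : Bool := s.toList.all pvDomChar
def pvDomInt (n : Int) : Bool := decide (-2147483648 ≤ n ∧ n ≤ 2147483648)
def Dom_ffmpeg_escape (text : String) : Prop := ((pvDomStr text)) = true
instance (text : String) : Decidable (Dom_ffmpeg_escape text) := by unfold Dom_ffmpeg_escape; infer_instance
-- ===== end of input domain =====

-- B replaces A's seven sequential full-string replace scans with one per-character pass; objective: idiomatic.

-- ===== PORT A =====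
-- the `replacements` list of A, in A's order
def ffmpegReplacements : List (String × String) :=
  [("\\", "\\\\"), (":", "\\:"), ("'", "\\'"), (",", "\\,"), ("%", "\\%"), ("[", "\\["), ("]", "\\]")]

def ffmpeg_escape (text : String) : String :=
  ffmpegReplacements.foldl (fun t p => PySem.Str.replace t p.1 p.2) text

-- ===== PORT B =====
-- Source B: "".join("\\" + c if c in specials else c for c in text), specials = "\\:',%[]"
def ffmpegSpecials : List Char := "\\:',%[]".toList

def ffmpeg_escape_alt (text : String) : String :=
  String.ofList (text.toList.flatMap (fun c => if c ∈ ffmpegSpecials then ['\\', c] else [c]))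

-- ===== PRECONDITION & SPEC =====
def Spec_ffmpeg_escape (text : String) (out : String) : Prop := out = ffmpeg_escape_alt text
instance (text : String) (out : String) : Decidable (Spec_ffmpeg_escape text out) := by unfold Spec_ffmpeg_escape; infer_instance

-- ===== CLAIM (what is proved, stated in full; the proofs are below) =====
def Claim_equal_ffmpeg_escape : Prop := ∀ (text : String), Dom_ffmpeg_escape text → Spec_ffmpeg_escape text (ffmpeg_escape text)

-- ===== LEMMAS AND PROOFS =====

-- single-character substitution, as a flatMap
def subChar (o : Char) (n : List Char) (c : Char) : List Char := if c = o then n else [c]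

lemma go_single (o : Char) (n : List Char) :
    ∀ (l : List Char) (fuel : Nat) (acc : List Char), l.length ≤ fuel →
      PySem.Chars.replace.go [o] n fuel l acc = acc.reverse ++ l.flatMap (subChar o n) := by
  intro l
  induction l with
  | nil =>
      intro fuel acc _
      cases fuel <;> simp [PySem.Chars.replace.go]
  | cons c t ih =>
      intro fuel acc h
      cases fuel with
      | zero => simp at h
      | succ fuel =>
          by_cases hc : c = o
          · subst hc
            have hpre : List.isPrefixOf [c] (c :: t) = true := by
              simp [List.isPrefixOf]
            rw [PySem.Chars.replace.go]
            simp only [hpre, if_true, List.length_cons, List.length_nil, List.drop_succ_cons, List.drop_zero]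
            rw [ih fuel (n.reverse ++ acc) (by simpa using Nat.le_of_succ_le_succ h)]
            simp [subChar]
          · have hpre : List.isPrefixOf [o] (c :: t) = false := by
              simp [List.isPrefixOf, BEq.beq]
              intro hco; exact hc hco.symm
            rw [PySem.Chars.replace.go]
            simp only [hpre]
            rw [ih fuel (c :: acc) (by simpa using Nat.le_of_succ_le_succ h)]
            simp [subChar, hc]

lemma replace_single (s : List Char) (o : Char) (n : List Char) :
    PySem.Chars.replace s [o] n = s.flatMap (subChar o n) := by
  rw [PySem.Chars.replace]
  simp only [List.isEmpty]
  exact go_single o n s s.length [] (le_refl _)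

lemma flatMap_sub_flatMap (o : Char) (n : List Char) (f : Char → List Char) (s : List Char) :
    (s.flatMap f).flatMap (subChar o n) = s.flatMap (fun c => (f c).flatMap (subChar o n)) := by
  induction s with
  | nil => simp
  | cons c t ih => simp [List.flatMap_cons, List.flatMap_append, ih]

-- character-level escape map of B
def escChar (c : Char) : List Char := if c ∈ ffmpegSpecials then ['\\', c] else [c]

lemma chain_eq_escChar (s : List Char) :
    ((((((s.flatMap (subChar '\\' ['\\', '\\'])).flatMap (subChar ':' ['\\', ':'])).flatMap
        (subChar '\'' ['\\', '\''])).flatMap (subChar ',' ['\\', ','])).flatMap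
        (subChar '%' ['\\', '%'])).flatMap (subChar '[' ['\\', '['])).flatMap (subChar ']' ['\\', ']'])
      = s.flatMap escChar := by
  simp only [flatMap_sub_flatMap]
  apply List.flatMap_congr
  intro c _
  by_cases h : c ∈ ffmpegSpecials
  · have : c = '\\' ∨ c = ':' ∨ c = '\'' ∨ c = ',' ∨ c = '%' ∨ c = '[' ∨ c = ']' := by
      simpa [ffmpegSpecials] using h
    rcases this with h|h|h|h|h|h|h <;> subst h <;> decide
  · simp only [ffmpegSpecials] at h
    obtain ⟨h1, h2, h3, h4, h5, h6, h7⟩ := by simpa using h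
    simp [subChar, escChar, ffmpegSpecials, h1, h2, h3, h4, h5, h6, h7]

-- ===== VERDICT (by name: the statement is the Claim_ definition above) =====
theorem ffmpeg_escape_spec : Claim_equal_ffmpeg_escape := by
  intro text _
  unfold Spec_ffmpeg_escape ffmpeg_escape ffmpeg_escape_alt ffmpegReplacements
  simp only [List.foldl_cons, List.foldl_nil, PySem.Str.replace,
    show ("\\" : String).toList = ['\\'] from rfl,
    show ("\\\\" : String).toList = ['\\', '\\'] from rfl,
    show (":" : String).toList = [':'] from rfl,
    show ("\\:" : String).toList = ['\\', ':'] from rfl,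
    show ("'" : String).toList = ['\''] from rfl,
    show ("\\'" : String).toList = ['\\', '\''] from rfl,
    show ("," : String).toList = [','] from rfl,
    show ("\\," : String).toList = ['\\', ','] from rfl,
    show ("%" : String).toList = ['%'] from rfl,
    show ("\\%" : String).toList = ['\\', '%'] from rfl,
    show ("[" : String).toList = ['['] from rfl,
    show ("\\[" : String).toList = ['\\', '['] from rfl,
    show ("]" : String).toList = [']'] from rfl,
    show ("\\]" : String).toList = ['\\', ']'] from rfl,
    String.toList_ofList, replace_single]
  rw [chain_eq_escChar]
  rfl
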